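-- pv_equiv track=rewrite | github.com/ArsKar/bitrix_impotrer | bitrix_importer.py | split_multi
-- ===== SOURCE A (Python) =====
-- import math
-- from typing import Any, Callable, Dict, List, Optional
--
-- def safe_str(value: Any) -> str:
--     if value is None:
--         return ""
--     if isinstance(value, float) and math.isnan(value):
--         return ""
--     return str(value).strip()
--
-- def split_multi(value: Any) -> List[str]:
--     text = safe_str(value)
--     if not text:
--         return []
--
--     parts = [text]
--     for sep in [";", ",", "\n"]:
--         next_parts: List[str] = []
--         for part in parts:
--             next_parts.extend(part.split(sep))
--         parts = next_parts
--
--     result: List[str] = []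
--     seen = set()
--     for part in parts:
--         item = part.strip()
--         if not item:
--             continue
--         key = item.lower()
--         if key in seen:
--             continue
--         seen.add(key)
--         result.append(item)
--     return result
-- ===== SOURCE B (Python) =====
-- def split_multi(value):
--     # single character-scan tokenizer with inline case-insensitive dedup
--     text = "" if value is None else str(value).strip()
--     out = []
--     seen = set()
--     cur = []
--     for ch in text:
--         if ch in ";,\n":
--             tok = "".join(cur).strip()
--             if tok and tok.lower() not in seen:
--                 seen.add(tok.lower())
--                 out.append(tok)
--             cur = []
--         else:
--             cur.append(ch)
--     tok = "".join(cur).strip()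
--     if tok and tok.lower() not in seen:
--         seen.add(tok.lower())
--         out.append(tok)
--     return out
-- ===== Notes on version B (the rewrite author's own statement) =====
-- stated objective: alternative
-- what changed: Replaces A's three sequential split passes (building an intermediate parts list per separator) plus a separate strip/dedup pass with a single character scan that tokenizes on the three separator characters (semicolon, comma, newline) and strips/dedups case-insensitively inline as tokens are flushed.
import Mathlib
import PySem

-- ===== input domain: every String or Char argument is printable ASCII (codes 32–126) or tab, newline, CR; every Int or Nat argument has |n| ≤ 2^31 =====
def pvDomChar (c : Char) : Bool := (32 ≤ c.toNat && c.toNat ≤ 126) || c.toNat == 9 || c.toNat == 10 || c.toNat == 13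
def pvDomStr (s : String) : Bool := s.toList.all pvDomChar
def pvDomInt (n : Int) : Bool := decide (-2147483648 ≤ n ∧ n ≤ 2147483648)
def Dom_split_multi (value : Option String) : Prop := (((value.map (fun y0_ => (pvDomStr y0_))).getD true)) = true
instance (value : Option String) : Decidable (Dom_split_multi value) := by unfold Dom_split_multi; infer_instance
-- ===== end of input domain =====

-- B replaces A's three sequential split passes plus a separate dedup pass by one character
-- scan that tokenizes on the separator characters and dedups case-insensitively inline (objective: alternative).

-- ===== PORT A =====
-- safe_str on an Option String input: None -> "", str -> the string itself, stripped
def split_multi (value : Option String) : List String :=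
  let text : String := match value with
    | none => ""
    | some s => PySem.Str.strip s
  if text.toList = [] then []
  else
    let parts0 : List (List Char) := [text.toList]
    let parts := [';', ',', '\n'].foldl
      (fun parts sep =>
        parts.foldl (fun next_parts part => next_parts ++ PySem.Chars.splitOn part [sep]) [])
      parts0
    (parts.foldl
      (fun (st : List String × PySem.Set (List Char)) part =>
        let item := PySem.Chars.strip part
        if item = [] then st
        else
          let key := PySem.Chars.lower item
          if PySem.Set.contains st.2 key then st
          else (st.1 ++ [String.ofList item], PySem.Set.add st.2 key))
      ([], PySem.Set.empty)).1

-- ===== PORT B =====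
-- the inline flush of Source B: strip the pending chars, skip empty / already-seen (lowercased) tokens
def altFlush (st : List String × PySem.Set (List Char) × List Char) :
    List String × PySem.Set (List Char) × List Char :=
  let tok := PySem.Chars.strip st.2.2
  if tok ≠ [] ∧ ¬ (PySem.Set.contains st.2.1 (PySem.Chars.lower tok) = true) then
    (st.1 ++ [String.ofList tok], PySem.Set.add st.2.1 (PySem.Chars.lower tok), [])
  else (st.1, st.2.1, [])

-- one character of Source B's loop; 'ch in ";,\n"' is exact as the three-way test (single chars)
def altStep (st : List String × PySem.Set (List Char) × List Char) (ch : Char) :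
    List String × PySem.Set (List Char) × List Char :=
  if ch == ';' || ch == ',' || ch == '\n' then altFlush st
  else (st.1, st.2.1, st.2.2 ++ [ch])

def split_multi_alt (value : Option String) : List String :=
  let text : String := match value with
    | none => ""
    | some s => PySem.Str.strip s
  (altFlush (text.toList.foldl altStep ([], PySem.Set.empty, []))).1

-- ===== PRECONDITION & SPEC =====
def Spec_split_multi (value : Option String) (out : List String) : Prop := out = split_multi_alt value
instance (value : Option String) (out : List String) : Decidable (Spec_split_multi value out) := by unfold Spec_split_multi; infer_instance

-- ===== CLAIM (what is proved, stated in full; the proofs are below) =====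
def Claim_equal_split_multi : Prop := ∀ (value : Option String), Dom_split_multi value → Spec_split_multi value (split_multi value)

-- ===== LEMMAS AND PROOFS =====

-- prepend a prefix onto the first piece of a split
def preHead (pre : List Char) : List (List Char) → List (List Char)
  | [] => [pre]
  | t :: ts => (pre ++ t) :: ts

-- canonical splitter on a character predicate
def splitP (p : Char → Bool) : List Char → List (List Char)
  | [] => [[]]
  | c :: cs => if p c then [] :: splitP p cs else preHead [c] (splitP p cs)

theorem splitP_ne_nil (p : Char → Bool) (cs : List Char) : splitP p cs ≠ [] := by
  cases cs with
  | nil => simp [splitP]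
  | cons c cs =>
    simp only [splitP]
    split
    · simp
    · cases h : splitP p cs <;> simp [preHead]

theorem preHead_preHead (a b : List Char) (s : List (List Char)) (h : s ≠ []) :
    preHead a (preHead b s) = preHead (a ++ b) s := by
  cases s with
  | nil => exact absurd rfl h
  | cons t ts => simp [preHead]

theorem preHead_nil_left (s : List (List Char)) (h : s ≠ []) : preHead [] s = s := by
  cases s with
  | nil => exact absurd rfl h
  | cons t ts => simp [preHead]

theorem preHead_append (a : List Char) (s r : List (List Char)) (h : s ≠ []) :
    preHead a (s ++ r) = preHead a s ++ r := by
  cases s with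
  | nil => exact absurd rfl h
  | cons t ts => simp [preHead]

theorem splitP_congr (p q : Char → Bool) (h : ∀ c, p c = q c) (cs : List Char) :
    splitP p cs = splitP q cs := by
  induction cs with
  | nil => rfl
  | cons c cs ih => simp only [splitP, h c, ih]

-- composing two single-predicate splits is splitting on the disjunction
theorem flatMap_splitP (p q : Char → Bool) (cs : List Char) :
    (splitP p cs).flatMap (splitP q) = splitP (fun c => p c || q c) cs := by
  induction cs with
  | nil => simp [splitP]
  | cons c cs ih =>
    by_cases hp : p c
    · have l1 : splitP p (c :: cs) = [] :: splitP p cs := by simp [splitP, hp]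
      have l2 : splitP (fun x => p x || q x) (c :: cs)
          = [] :: splitP (fun x => p x || q x) cs := by simp [splitP, hp]
      rw [l1, l2, List.flatMap_cons, ← ih]
      simp [splitP]
    · obtain ⟨t, ts, hts⟩ : ∃ t ts, splitP p cs = t :: ts := by
        cases h : splitP p cs with
        | nil => exact absurd h (splitP_ne_nil p cs)
        | cons t ts => exact ⟨t, ts, rfl⟩
      have l1 : splitP p (c :: cs) = (c :: t) :: ts := by
        simp [splitP, hp, hts, preHead]
      by_cases hq : q c
      · have l2 : splitP (fun x => p x || q x) (c :: cs)
            = [] :: splitP (fun x => p x || q x) cs := by simp [splitP, hp, hq]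
        have l3 : splitP q (c :: t) = [] :: splitP q t := by simp [splitP, hq]
        rw [l1, l2, List.flatMap_cons, l3, ← ih, hts, List.flatMap_cons]
        simp
      · have l2 : splitP (fun x => p x || q x) (c :: cs)
            = preHead [c] (splitP (fun x => p x || q x) cs) := by simp [splitP, hp, hq]
        have l3 : splitP q (c :: t) = preHead [c] (splitP q t) := by simp [splitP, hq]
        rw [l1, l2, List.flatMap_cons, l3, ← ih, hts, List.flatMap_cons,
          preHead_append [c] (splitP q t) _ (splitP_ne_nil q t)]

-- PySem's fuel-based splitOn on a single-char separator is the canonical splitter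
theorem splitOn_go_eq (a : Char) (fuel : Nat) (l cur : List Char) (acc : List (List Char))
    (h : l.length ≤ fuel) :
    PySem.Chars.splitOn.go [a] fuel l cur acc
      = acc.reverse ++ preHead cur.reverse (splitP (· == a) l) := by
  induction fuel generalizing l cur acc with
  | zero =>
    have : l = [] := List.eq_nil_of_length_eq_zero (Nat.le_zero.mp h)
    subst this
    simp [PySem.Chars.splitOn.go, splitP, preHead]
  | succ fuel ih =>
    cases l with
    | nil => simp [PySem.Chars.splitOn.go, splitP, preHead]
    | cons c rest =>
      simp only [PySem.Chars.splitOn.go]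
      by_cases hc : c = a
      · subst hc
        have hpre : List.isPrefixOf [c] (c :: rest) = true := by
          simp [List.isPrefixOf]
        rw [if_pos hpre]
        simp only [List.length_cons] at h
        rw [show List.drop [c].length (c :: rest) = rest from by simp]
        rw [ih rest [] (cur.reverse :: acc) (Nat.le_of_succ_le_succ h)]
        simp only [List.reverse_cons, List.reverse_nil]
        rw [preHead_nil_left _ (splitP_ne_nil _ _)]
        simp only [splitP, beq_self_eq_true, if_pos]
        simp [preHead]
      · have hpre : List.isPrefixOf [a] (c :: rest) = false := by
          simp [List.isPrefixOf]; exact fun hh => absurd hh.symm hc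
        rw [if_neg (by simp [hpre])]
        simp only [List.length_cons] at h
        rw [ih rest (c :: cur) acc (Nat.le_of_succ_le_succ h)]
        simp only [List.reverse_cons, splitP]
        rw [if_neg (by simp [hc])]
        rw [preHead_preHead cur.reverse [c] _ (splitP_ne_nil _ _)]

theorem splitOn_singleton (a : Char) (cs : List Char) :
    PySem.Chars.splitOn cs [a] = splitP (· == a) cs := by
  show PySem.Chars.splitOn.go [a] (cs.length + 1) cs [] [] = _
  rw [splitOn_go_eq a (cs.length + 1) cs [] [] (Nat.le_succ _)]
  simp [preHead_nil_left _ (splitP_ne_nil _ _)]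

-- the predicate the three sequential splits compose to
def p3 : Char → Bool := fun c => c == ';' || c == ',' || c == '\n'

-- A's dedup-loop body, as a function of the (result, seen) state
def dedupStep (st : List String × PySem.Set (List Char)) (part : List Char) :
    List String × PySem.Set (List Char) :=
  let item := PySem.Chars.strip part
  if item = [] then st
  else
    let key := PySem.Chars.lower item
    if PySem.Set.contains st.2 key then st
    else (st.1 ++ [String.ofList item], PySem.Set.add st.2 key)

theorem altFlush_eq_dedupStep (out : List String) (seen : PySem.Set (List Char)) (cur : List Char) :
    altFlush (out, seen, cur)
      = ((dedupStep (out, seen) cur).1, (dedupStep (out, seen) cur).2, []) := by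
  simp only [altFlush, dedupStep]
  by_cases h1 : PySem.Chars.strip cur = []
  · simp [h1]
  · by_cases h2 : PySem.Chars.lower (PySem.Chars.strip cur) ∈ seen
    · simp [h1, h2]
    · simp [h1, h2]

-- the single char scan with pending prefix cur computes the dedup fold over the split pieces
theorem scan_eq_dedup (cs : List Char) (out : List String) (seen : PySem.Set (List Char))
    (cur : List Char) :
    (altFlush (cs.foldl altStep (out, seen, cur))).1
      = ((preHead cur (splitP p3 cs)).foldl dedupStep (out, seen)).1 := by
  induction cs generalizing out seen cur with
  | nil =>
    simp only [List.foldl_nil, splitP, preHead, List.foldl_cons, List.foldl_nil,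
      altFlush_eq_dedupStep, List.append_nil]
  | cons c cs ih =>
    by_cases hc : p3 c = true
    · have hstep : altStep (out, seen, cur) c = altFlush (out, seen, cur) := by
        simp only [altStep]; rw [if_pos (by simpa [p3] using hc)]
      simp only [List.foldl_cons, hstep, altFlush_eq_dedupStep]
      rw [ih]
      rw [preHead_nil_left _ (splitP_ne_nil _ _)]
      simp only [splitP, hc, if_pos]
      obtain ⟨t, ts, hts⟩ : ∃ t ts, splitP p3 cs = t :: ts := by
        cases h : splitP p3 cs with
        | nil => exact absurd h (splitP_ne_nil p3 cs)
        | cons t ts => exact ⟨t, ts, rfl⟩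
      simp [hts, preHead]
    · have hstep : altStep (out, seen, cur) c = (out, seen, cur ++ [c]) := by
        simp only [altStep]; rw [if_neg (by simpa [p3] using hc)]
      simp only [List.foldl_cons, hstep]
      rw [ih]
      simp only [splitP]
      rw [if_neg (by simp [hc]), preHead_preHead cur [c] _ (splitP_ne_nil _ _)]

-- A's three sequential split passes produce exactly the one-predicate split
theorem parts_eq (cs : List Char) :
    [';', ',', '\n'].foldl
      (fun parts sep =>
        parts.foldl (fun next_parts part => next_parts ++ PySem.Chars.splitOn part [sep]) [])
      [cs]
      = splitP p3 cs := by
  simp only [List.foldl_cons, List.foldl_nil]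
  rw [PySem.List.foldl_append_eq_flatMap, PySem.List.foldl_append_eq_flatMap]
  simp only [List.nil_append]
  have h1 : ∀ ds : List (List Char), ∀ a : Char,
      ds.flatMap (fun part => PySem.Chars.splitOn part [a]) = ds.flatMap (splitP (· == a)) := by
    intro ds a
    congr 1
    funext part
    exact splitOn_singleton a part
  rw [splitOn_singleton, h1, h1, flatMap_splitP, flatMap_splitP]
  exact splitP_congr _ _ (by intro c; simp [p3, Bool.or_assoc]) cs

-- the two ports agree as functions of the shared normalized text
theorem body_eq (text : String) :
    (if text.toList = [] then ([] : List String)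
     else
       (([';', ',', '\n'].foldl
          (fun parts sep =>
            parts.foldl (fun next_parts part => next_parts ++ PySem.Chars.splitOn part [sep]) [])
          [text.toList]).foldl dedupStep ([], PySem.Set.empty)).1)
      = (altFlush (text.toList.foldl altStep ([], PySem.Set.empty, []))).1 := by
  rw [scan_eq_dedup text.toList [] PySem.Set.empty []]
  rw [preHead_nil_left _ (splitP_ne_nil _ _)]
  by_cases h : text.toList = []
  · rw [if_pos h, h]
    simp [splitP, dedupStep, PySem.Chars.strip, PySem.Chars.lstrip, PySem.Chars.rstrip]
  · rw [if_neg h, parts_eq]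

-- ===== VERDICT (by name: the statement is the Claim_ definition above) =====
theorem split_multi_spec : Claim_equal_split_multi := by
  intro value _
  unfold Spec_split_multi split_multi split_multi_alt
  cases value with
  | none => exact body_eq ""
  | some s => exact body_eq (PySem.Str.strip s)
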